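-- pv_equiv track=rewrite | github.com/gokhanmutlu/Python-Final-Project | PROJE/deneme.py | findMaxBasePointUni
-- ===== SOURCE A (Python) =====
-- def findMaxBasePointUni(listOfUniversity):
--     maxpointuni = []
--     maxPoint = listOfUniversity[0][2]
--     for index in range(len(listOfUniversity)):
--         if listOfUniversity[index][2] > maxPoint:
--             maxPoint = listOfUniversity[index][2]
--     for uni in range(len(listOfUniversity)):
--         if listOfUniversity[uni][2] == maxPoint:
--             maxpointuni.append(listOfUniversity[uni][1])
--     return maxpointuni
-- ===== SOURCE B (Python) =====
-- def findMaxBasePointUni(listOfUniversity):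
--     best = listOfUniversity[0][2]
--     result = []
--     for item in listOfUniversity:
--         point = item[2]
--         if point > best:
--             best = point
--             result = [item[1]]
--         elif point == best:
--             result.append(item[1])
--     return result
-- ===== Notes on version B (the rewrite author's own statement) =====
-- stated objective: alternative
-- what changed: B replaces A's two index-based passes (first compute the max, then collect matching names) with a single pass that maintains the running max and its name list together, resetting the list when a new max appears.
import Mathlib
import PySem

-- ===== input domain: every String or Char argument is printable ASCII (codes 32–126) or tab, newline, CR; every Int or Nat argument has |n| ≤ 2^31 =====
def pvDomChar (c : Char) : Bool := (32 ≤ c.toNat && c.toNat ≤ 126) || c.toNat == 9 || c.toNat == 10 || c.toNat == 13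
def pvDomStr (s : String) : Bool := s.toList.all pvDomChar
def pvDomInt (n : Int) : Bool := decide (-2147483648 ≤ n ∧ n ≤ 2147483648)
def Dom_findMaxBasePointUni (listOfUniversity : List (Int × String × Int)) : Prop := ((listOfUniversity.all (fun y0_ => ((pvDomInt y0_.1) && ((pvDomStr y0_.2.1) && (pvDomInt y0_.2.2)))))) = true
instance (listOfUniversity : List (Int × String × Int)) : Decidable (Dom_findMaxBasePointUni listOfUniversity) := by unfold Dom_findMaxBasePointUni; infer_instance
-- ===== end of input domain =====

-- B replaces A's two index passes (max, then collect) with one pass keeping the running max and its names together; alternative decomposition, same cost.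


-- ===== PORT A =====
-- listOfUniversity[0][2] raises IndexError on []; that input is excluded by Pre_ below, the guard only makes the port total.
def findMaxBasePointUni (listOfUniversity : List (Int × String × Int)) : List String :=
  match PySem.List.pyGet? listOfUniversity 0 with
  | none => []
  | some first =>
    let maxPoint : Int :=
      (PySem.List.pyRange 0 listOfUniversity.length 1).foldl
        (fun maxPoint index =>
          let x := PySem.List.pyGetD listOfUniversity index (0, "", 0)
          if x.2.2 > maxPoint then x.2.2 else maxPoint) first.2.2
    (PySem.List.pyRange 0 listOfUniversity.length 1).foldl
      (fun maxpointuni uni =>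
        let x := PySem.List.pyGetD listOfUniversity uni (0, "", 0)
        if x.2.2 = maxPoint then maxpointuni ++ [x.2.1] else maxpointuni) []

-- ===== PORT B =====
-- single pass: state = (best, result); reset result on a strictly larger point, append on equal
def findMaxBasePointUni_alt (listOfUniversity : List (Int × String × Int)) : List String :=
  match PySem.List.pyGet? listOfUniversity 0 with
  | none => []
  | some first =>
    (listOfUniversity.foldl
      (fun (st : Int × List String) item =>
        let point := item.2.2
        if point > st.1 then (point, [item.2.1])
        else if point = st.1 then (st.1, st.2 ++ [item.2.1])
        else st) (first.2.2, [])).2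

-- ===== PRECONDITION & SPEC =====
-- Pre_ excludes only the empty list, on which Python A (and B) raise IndexError.
def Pre_findMaxBasePointUni (listOfUniversity : List (Int × String × Int)) : Prop := listOfUniversity ≠ []
instance (listOfUniversity : List (Int × String × Int)) : Decidable (Pre_findMaxBasePointUni listOfUniversity) := by unfold Pre_findMaxBasePointUni; infer_instance
def pvWitness_findMaxBasePointUni : (List (Int × String × Int)) := [(1, "A", 300), (2, "B", 450), (3, "C", 450)]

def Spec_findMaxBasePointUni (listOfUniversity : List (Int × String × Int)) (out : List String) : Prop := out = findMaxBasePointUni_alt listOfUniversity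
instance (listOfUniversity : List (Int × String × Int)) (out : List String) : Decidable (Spec_findMaxBasePointUni listOfUniversity out) := by unfold Spec_findMaxBasePointUni; infer_instance

-- ===== CLAIM (what is proved, stated in full; the proofs are below) =====
def Claim_equal_findMaxBasePointUni : Prop := ∀ (listOfUniversity : List (Int × String × Int)), Dom_findMaxBasePointUni listOfUniversity → Pre_findMaxBasePointUni listOfUniversity → Spec_findMaxBasePointUni listOfUniversity (findMaxBasePointUni listOfUniversity)

-- ===== LEMMAS AND PROOFS =====

-- the running max never decreases below its initial value
theorem pvMax_le (l : List (Int × String × Int)) (c : Int) :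
    c ≤ l.foldl (fun m x => if x.2.2 > m then x.2.2 else m) c := by
  induction l generalizing c with
  | nil => simp
  | cons x t ih =>
    simp only [List.foldl_cons]
    by_cases h : x.2.2 > c
    · rw [if_pos h]; have := ih x.2.2; omega
    · rw [if_neg h]; exact ih c

-- A's second pass, as a fold over the list itself, is filterMap of the names with maximal point.
theorem pvA_collect (l : List (Int × String × Int)) (m : Int) (acc : List String) :
    l.foldl (fun a x => if x.2.2 = m then a ++ [x.2.1] else a) acc
      = acc ++ l.filterMap (fun x => if x.2.2 = m then some x.2.1 else none) := by
  induction l generalizing acc with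
  | nil => simp
  | cons x t ih =>
    simp only [List.foldl_cons, List.filterMap_cons]
    by_cases h : x.2.2 = m
    · rw [if_pos h, if_pos h, ih]; simp
    · rw [if_neg h, if_neg h, ih]

-- B's single-pass fold computes the running max together with exactly A's filterMap.
theorem pvB_inv (l : List (Int × String × Int)) (b : Int) (acc : List String) :
    l.foldl
      (fun (st : Int × List String) item =>
        if item.2.2 > st.1 then (item.2.2, [item.2.1])
        else if item.2.2 = st.1 then (st.1, st.2 ++ [item.2.1])
        else st) (b, acc)
      = (l.foldl (fun m x => if x.2.2 > m then x.2.2 else m) b,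
         (if b = l.foldl (fun m x => if x.2.2 > m then x.2.2 else m) b then acc else []) ++
           l.filterMap (fun x =>
             if x.2.2 = l.foldl (fun m y => if y.2.2 > m then y.2.2 else m) b then some x.2.1 else none)) := by
  induction l generalizing b acc with
  | nil => simp
  | cons x t ih =>
    simp only [List.foldl_cons, List.filterMap_cons]
    by_cases h1 : x.2.2 > b
    · simp only [if_pos h1, ih]
      have hb : ¬ b = t.foldl (fun m x => if x.2.2 > m then x.2.2 else m) x.2.2 := by
        have := pvMax_le t x.2.2; omega
      simp only [if_neg hb]
      by_cases h2 : x.2.2 = t.foldl (fun m y => if y.2.2 > m then y.2.2 else m) x.2.2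
      · simp only [if_pos h2]; simp
      · simp only [if_neg h2]
    · simp only [if_neg h1]
      by_cases h2 : x.2.2 = b
      · simp only [if_pos h2, ih]
        by_cases h3 : b = t.foldl (fun m x => if x.2.2 > m then x.2.2 else m) b
        · simp only [if_pos h3, if_pos (h2.trans h3)]
          simp
        · have hne : ¬ x.2.2 = t.foldl (fun m x => if x.2.2 > m then x.2.2 else m) b := by
            rw [h2]; exact h3
          simp only [if_neg h3, if_neg hne]
      · simp only [if_neg h2, ih]
        have hx : ¬ x.2.2 = t.foldl (fun m y => if y.2.2 > m then y.2.2 else m) b := by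
          have := pvMax_le t b; omega
        simp only [if_neg hx]

-- ===== VERDICT (by name: the statement is the Claim_ definition above) =====
theorem findMaxBasePointUni_spec : Claim_equal_findMaxBasePointUni := by
  intro l _ hpre
  obtain ⟨x, t, rfl⟩ : ∃ x t, l = x :: t := by
    cases l with
    | nil => exact absurd rfl hpre
    | cons x t => exact ⟨x, t, rfl⟩
  unfold Spec_findMaxBasePointUni findMaxBasePointUni findMaxBasePointUni_alt
  rw [PySem.List.pyGet?_zero_cons]
  dsimp only
  rw [PySem.List.foldl_pyRange_zero_pyGetD' (x :: t) (0, "", 0)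
        (fun maxPoint y => if y.2.2 > maxPoint then y.2.2 else maxPoint) x.2.2]
  rw [PySem.List.foldl_pyRange_zero_pyGetD' (x :: t) (0, "", 0)
        (fun a y => if y.2.2 = (x :: t).foldl (fun m y => if y.2.2 > m then y.2.2 else m) x.2.2
                    then a ++ [y.2.1] else a) []]
  rw [pvB_inv, pvA_collect]
  simp
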